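-- pv_equiv track=rewrite | github.com/hyeonjun/AlgorithmTest | Algorithm_Study/Algorithm_Type/BackTracking.py | solution
-- ===== SOURCE A (Python) =====
-- def solution(l,c,password): # combinations(조합)을 사용할 때
--     from itertools import combinations
--     password.sort()
--     answer = set()
--     vowels = ['a','e','i','o','u']
--     for i in combinations(password, 4):
--         cnt = 0
--         for j in i:
--             if j in vowels:
--                 cnt += 1
--         if 1 <= cnt <= l-2:
--             answer.add("".join(i))
--
--     return answer
-- ===== SOURCE B (Python) =====
-- def solution(l, c, password):
--     # depth-first backtracking (include/exclude with pruning) instead of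
--     # generate-all combinations + count-and-filter; mutates password via sort()
--     password.sort()
--     vowels = {'a', 'e', 'i', 'o', 'u'}
--     limit = l - 2
--     answer = set()
--     n = len(password)
--
--     def backtrack(i, chosen, cnt):
--         if cnt > limit:
--             return
--         if len(chosen) == 4:
--             if cnt >= 1:
--                 answer.add("".join(chosen))
--             return
--         if i == n:
--             return
--         w = password[i]
--         backtrack(i + 1, chosen + [w], cnt + (1 if w in vowels else 0))
--         backtrack(i + 1, chosen, cnt)
--
--     backtrack(0, [], 0)
--     return answer
-- ===== Notes on version B (the rewrite author's own statement) =====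
-- stated objective: alternative
-- what changed: Replaces itertools.combinations generate-all + per-tuple vowel counting and filtering by a recursive include/exclude depth-first backtracking that carries the running vowel count and prunes whole subtrees once the count exceeds l-2, inserting the same strings into the set in the same order.
import Mathlib
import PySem

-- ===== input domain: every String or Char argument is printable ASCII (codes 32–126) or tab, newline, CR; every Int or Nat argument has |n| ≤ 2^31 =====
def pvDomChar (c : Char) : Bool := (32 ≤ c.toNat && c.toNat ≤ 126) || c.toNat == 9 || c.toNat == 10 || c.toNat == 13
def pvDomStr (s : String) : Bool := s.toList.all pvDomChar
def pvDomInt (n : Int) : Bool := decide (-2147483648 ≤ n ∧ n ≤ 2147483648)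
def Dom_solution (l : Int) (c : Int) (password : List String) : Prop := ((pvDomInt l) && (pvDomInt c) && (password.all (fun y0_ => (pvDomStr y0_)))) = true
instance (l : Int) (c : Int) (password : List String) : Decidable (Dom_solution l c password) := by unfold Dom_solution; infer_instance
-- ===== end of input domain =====

-- B replaces generate-all-4-combinations + count-and-filter by depth-first include/exclude
-- backtracking with pruning (objective: alternative decomposition, similar cost).
-- Both A and B sort `password` in place; the equivalence proved here is about the return value
-- (a Python set, modelled as its insertion-order element list; both programs insert in the same order).


-- ===== PORT A =====
-- itertools.combinations(xs, k), in itertools' order (tuples as lists)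
def combosA {α : Type} : Nat → List α → List (List α)
  | 0, _ => [[]]
  | _ + 1, [] => []
  | k + 1, x :: xs => (combosA k xs).map (fun t => x :: t) ++ combosA (k + 1) xs

def solution (l : Int) (c : Int) (password : List String) : List String :=
  let password := PySem.List.sorted password (fun s => s) false   -- password.sort()
  let answer : PySem.Set String := PySem.Set.empty
  let vowels : List String := ["a", "e", "i", "o", "u"]
  (combosA 4 password).foldl (fun answer i =>
    let cnt : Int := i.foldl (fun cnt j => if vowels.contains j then cnt + 1 else cnt) 0
    if 1 ≤ cnt ∧ cnt ≤ l - 2 then PySem.Set.add answer (PySem.Str.join "" i) else answer) answer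

-- ===== PORT B =====
-- backtrack(i, chosen, cnt) from Source B; the index suffix password[i:] is carried as `rest`
def btB (limit : Int) (vowels : PySem.Set String) :
    (rest : List String) → (chosen : List String) → (cnt : Int) →
    (answer : PySem.Set String) → PySem.Set String
  | rest, chosen, cnt, answer =>
    if cnt > limit then answer
    else if chosen.length = 4 then
      (if 1 ≤ cnt then PySem.Set.add answer (PySem.Str.join "" chosen) else answer)
    else
      match rest with
      | [] => answer
      | w :: xs =>
        btB limit vowels xs chosen cnt
          (btB limit vowels xs (chosen ++ [w]) (cnt + (if vowels.contains w then 1 else 0)) answer)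
  termination_by rest => rest.length

def solution_alt (l : Int) (c : Int) (password : List String) : List String :=
  let password := PySem.List.sorted password (fun s => s) false   -- password.sort()
  let vowels : PySem.Set String := PySem.Set.ofList ["a", "e", "i", "o", "u"]
  let limit := l - 2
  btB limit vowels password [] 0 PySem.Set.empty

-- ===== PRECONDITION & SPEC =====
def Spec_solution (l : Int) (c : Int) (password : List String) (out : List String) : Prop := out = solution_alt l c password
instance (l : Int) (c : Int) (password : List String) (out : List String) : Decidable (Spec_solution l c password out) := by unfold Spec_solution; infer_instance

-- ===== CLAIM (what is proved, stated in full; the proofs are below) =====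
def Claim_equal_solution : Prop := ∀ (l : Int) (c : Int) (password : List String), Dom_solution l c password → Spec_solution l c password (solution l c password)

-- ===== LEMMAS AND PROOFS =====

-- A's inner vowel-counting loop, started from `cnt`
def cntF (cnt : Int) (t : List String) : Int :=
  t.foldl (fun cnt j => if (["a", "e", "i", "o", "u"] : List String).contains j then cnt + 1 else cnt) cnt

lemma cntF_nil (cnt : Int) : cntF cnt [] = cnt := rfl

lemma cntF_cons (cnt : Int) (w : String) (t : List String) :
    cntF cnt (w :: t) =
      cntF (cnt + (if (PySem.Set.ofList ["a", "e", "i", "o", "u"] : PySem.Set String).contains w then 1 else 0)) t := by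
  have hv : (PySem.Set.ofList (["a", "e", "i", "o", "u"] : List String)).contains w
      = (["a", "e", "i", "o", "u"] : List String).contains w := by
    simp [PySem.Set.contains, show PySem.Set.ofList (["a", "e", "i", "o", "u"] : List String)
      = ["a", "e", "i", "o", "u"] from by decide]
  simp only [cntF, List.foldl_cons, hv]
  split_ifs with h <;> simp

lemma cntF_mono (t : List String) : ∀ cnt : Int, cnt ≤ cntF cnt t := by
  induction t with
  | nil => intro cnt; simp [cntF_nil]
  | cons w t ih =>
    intro cnt
    simp only [cntF, List.foldl_cons]
    split_ifs with h
    · exact le_trans (by omega) (ih (cnt + 1))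
    · exact ih cnt

lemma foldl_if_false {α β : Type} (P : β → Prop) [DecidablePred P] (g : α → β → α)
    (L : List β) (a : α) (h : ∀ t ∈ L, ¬ P t) :
    L.foldl (fun a t => if P t then g a t else a) a = a := by
  induction L generalizing a with
  | nil => rfl
  | cons x xs ih =>
    simp only [List.foldl_cons, if_neg (h x (by simp))]
    exact ih a (fun t ht => h t (by simp [ht]))

-- the fold A performs over combinations, parameterised by the prefix already chosen
def afold (l : Int) (chosen : List String) (cnt : Int) (acc : PySem.Set String)
    (L : List (List String)) : PySem.Set String :=
  L.foldl (fun acc t =>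
    if 1 ≤ cntF cnt t ∧ cntF cnt t ≤ l - 2
    then PySem.Set.add acc (PySem.Str.join "" (chosen ++ t)) else acc) acc

-- core invariant: B's backtracking equals A's filtered fold over the remaining combinations
lemma bt_eq (l : Int) (rest : List String) :
    ∀ (chosen : List String) (cnt : Int) (acc : PySem.Set String), chosen.length ≤ 4 →
    btB (l - 2) (PySem.Set.ofList ["a", "e", "i", "o", "u"]) rest chosen cnt acc
      = afold l chosen cnt acc (combosA (4 - chosen.length) rest) := by
  induction rest with
  | nil =>
    intro chosen cnt acc h
    rw [btB]
    by_cases hc : cnt > l - 2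
    · rw [if_pos hc]
      rcases Nat.eq_or_lt_of_le h with h4 | h4
      · have : 4 - chosen.length = 0 := by omega
        rw [this]
        simp [combosA, afold, cntF_nil]
        intro h1; omega
      · have : ∃ k, 4 - chosen.length = k + 1 := ⟨3 - chosen.length, by omega⟩
        obtain ⟨k, hk⟩ := this
        rw [hk]; simp [combosA, afold]
    · rw [if_neg hc]
      by_cases h4 : chosen.length = 4
      · rw [if_pos h4]
        have : 4 - chosen.length = 0 := by omega
        rw [this]
        simp only [combosA, afold, List.foldl_cons, List.foldl_nil, cntF_nil, List.append_nil]
        split_ifs with ha hb hb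
        · rfl
        · omega
        · omega
        · rfl
      · rw [if_neg h4]
        have : ∃ k, 4 - chosen.length = k + 1 := ⟨3 - chosen.length, by omega⟩
        obtain ⟨k, hk⟩ := this
        rw [hk]; simp [combosA, afold]
  | cons w xs ih =>
    intro chosen cnt acc h
    rw [btB]
    by_cases hc : cnt > l - 2
    · rw [if_pos hc]
      exact (foldl_if_false _ _ _ _ (fun t _ => by
        have := cntF_mono t cnt; intro hP; omega)).symm
    · rw [if_neg hc]
      by_cases h4 : chosen.length = 4
      · rw [if_pos h4]
        have : 4 - chosen.length = 0 := by omega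
        rw [this]
        simp only [combosA, afold, List.foldl_cons, List.foldl_nil, cntF_nil, List.append_nil]
        split_ifs with ha hb hb
        · rfl
        · omega
        · omega
        · rfl
      · rw [if_neg h4]
        have hk : 4 - chosen.length = (4 - (chosen ++ [w]).length) + 1 := by
          simp; omega
        rw [hk]
        simp only [combosA, afold, List.foldl_append, List.foldl_map]
        have hstep : (fun (acc : PySem.Set String) (t : List String) =>
            if 1 ≤ cntF cnt (w :: t) ∧ cntF cnt (w :: t) ≤ l - 2
            then PySem.Set.add acc (PySem.Str.join "" (chosen ++ w :: t)) else acc)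
            = (fun (acc : PySem.Set String) (t : List String) =>
            if 1 ≤ cntF (cnt + (if (PySem.Set.ofList ["a", "e", "i", "o", "u"] : PySem.Set String).contains w then 1 else 0)) t
              ∧ cntF (cnt + (if (PySem.Set.ofList ["a", "e", "i", "o", "u"] : PySem.Set String).contains w then 1 else 0)) t ≤ l - 2
            then PySem.Set.add acc (PySem.Str.join "" ((chosen ++ [w]) ++ t)) else acc) := by
          funext acc t
          rw [cntF_cons]
          simp
        rw [hstep]
        rw [← afold, ← afold]
        rw [← ih (chosen ++ [w]) _ acc (by simp; omega), ← hk, ← ih chosen cnt _ (by omega)]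

-- ===== VERDICT (by name: the statement is the Claim_ definition above) =====
theorem solution_spec : Claim_equal_solution := by
  intro l c password _
  unfold Spec_solution solution solution_alt
  rw [bt_eq l _ [] 0 PySem.Set.empty (by simp)]
  simp only [afold, List.length_nil, Nat.sub_zero, List.nil_append, cntF]
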